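-- pv_equiv track=rewrite | github.com/daniel-reich/turbo-robot | bdsWZ29zJfJ2Roymv_14.py | swap_two
-- ===== SOURCE A (Python) =====
-- def swap_two(txt):
--   txt = list(txt)
--   try:
--     for i in range(0,len(txt),+4):
--       txt[i+2],txt[i+3],txt[i],txt[i+1] = txt[i:i+4]
--   except ValueError:
--     return "".join(txt)
--   return "".join(txt)
-- ===== SOURCE B (Python) =====
-- def swap_two(txt):
--   n = len(txt) - len(txt) % 4
--   return ''.join(txt[i+2:i+4] + txt[i:i+2] for i in range(0, n, 4)) + txt[n:]
-- ===== Notes on version B (the rewrite author's own statement) =====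
-- stated objective: simpler
-- what changed: B builds the output purely from string slices over complete 4-blocks plus the untouched tail, instead of A's in-place list mutation with tuple unpacking and a ValueError catch for the tail.
import Mathlib
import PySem

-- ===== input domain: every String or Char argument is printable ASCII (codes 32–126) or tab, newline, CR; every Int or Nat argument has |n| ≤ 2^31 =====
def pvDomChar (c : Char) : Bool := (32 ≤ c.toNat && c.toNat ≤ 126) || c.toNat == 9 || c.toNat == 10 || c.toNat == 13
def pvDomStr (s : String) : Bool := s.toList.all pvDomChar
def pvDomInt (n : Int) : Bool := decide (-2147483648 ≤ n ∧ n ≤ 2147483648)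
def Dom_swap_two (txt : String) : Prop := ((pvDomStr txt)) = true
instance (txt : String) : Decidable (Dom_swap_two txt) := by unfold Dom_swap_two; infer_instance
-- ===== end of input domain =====

-- B replaces A's in-place list mutation with a ValueError-caught tuple unpacking by pure slicing over the complete 4-blocks plus the untouched tail (simpler; same cost).

-- ===== PORT A =====
-- the for-loop over range(0, len(txt), 4): index recursion i → i+4 over the (length-preserving) list state;
-- a slice of fewer than 4 elements makes the tuple unpacking raise ValueError → the loop stops and the list so far is joined.
def swapTwoLoopA (cs : List Char) (i : Nat) : List Char :=
  if _h : i < cs.length then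
    match (cs.drop i).take 4 with
    | [a, b, c, d] =>
        -- txt[i+2],txt[i+3],txt[i],txt[i+1] = txt[i:i+4]
        swapTwoLoopA (((((cs.set (i+2) a).set (i+3) b).set i c).set (i+1) d)) (i+4)
    | _ => cs   -- ValueError: return "".join(txt)
  else cs
termination_by cs.length - i
decreasing_by simp only [List.length_set]; omega

def swap_two (txt : String) : String := String.ofList (swapTwoLoopA txt.toList 0)

-- ===== PORT B =====
-- ''.join(txt[i+2:i+4] + txt[i:i+2] for i in range(0, n, 4)) + txt[n:], n = len - len % 4:
-- index recursion i → i+4 emitting the two slices; all slice bounds are nonnegative and the stop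
-- clamps to the end, so drop/take is exact Python slicing here.
def swapTwoBuildB (cs : List Char) (n i : Nat) : List Char :=
  if _h : i < n then
    ((cs.drop (i+2)).take 2 ++ (cs.drop i).take 2) ++ swapTwoBuildB cs n (i+4)
  else []
termination_by n - i

def swap_two_alt (txt : String) : String :=
  String.ofList (swapTwoBuildB txt.toList (txt.toList.length - txt.toList.length % 4) 0
                 ++ txt.toList.drop (txt.toList.length - txt.toList.length % 4))

-- ===== PRECONDITION & SPEC =====
def Spec_swap_two (txt : String) (out : String) : Prop := out = swap_two_alt txt
instance (txt : String) (out : String) : Decidable (Spec_swap_two txt out) := by unfold Spec_swap_two; infer_instance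

-- ===== CLAIM (what is proved, stated in full; the proofs are below) =====
def Claim_equal_swap_two : Prop := ∀ (txt : String), Dom_swap_two txt → Spec_swap_two txt (swap_two txt)

-- ===== LEMMAS AND PROOFS =====

-- common specification: swap the halves of each complete 4-block, leave the short tail
def swapTwoSpec : List Char → List Char
  | a :: b :: c :: d :: rest => c :: d :: a :: b :: swapTwoSpec rest
  | rest => rest

-- the four left-to-right assignments on pre ++ a::b::c::d::post turn the block into c::d::a::b
lemma set4_block (pre post : List Char) (a b c d : Char) :
    (((((pre ++ a :: b :: c :: d :: post).set (pre.length+2) a).set (pre.length+3) b).set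
        pre.length c).set (pre.length+1) d) = pre ++ c :: d :: a :: b :: post := by
  induction pre with
  | nil => rfl
  | cons x xs ih =>
      simp only [List.cons_append, List.length_cons]
      have e : ∀ k : Nat, xs.length + 1 + k = (xs.length + k) + 1 := by omega
      simp only [e] at *
      simp [List.set_cons_succ]

lemma swapTwoLoopA_eq (rest pre : List Char) :
    swapTwoLoopA (pre ++ rest) pre.length = pre ++ swapTwoSpec rest := by
  match rest with
  | [] => rw [swapTwoLoopA]; simp [swapTwoSpec]
  | [a] =>
      rw [swapTwoLoopA, dif_pos (by simp), List.drop_left]; simp [swapTwoSpec]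
  | [a, b] =>
      rw [swapTwoLoopA, dif_pos (by simp), List.drop_left]; simp [swapTwoSpec]
  | [a, b, c] =>
      rw [swapTwoLoopA, dif_pos (by simp), List.drop_left]; simp [swapTwoSpec]
  | a :: b :: c :: d :: rest' =>
      rw [swapTwoLoopA, dif_pos (by simp), List.drop_left,
          show (a :: b :: c :: d :: rest').take 4 = [a, b, c, d] from rfl]
      show swapTwoLoopA _ _ = _
      rw [set4_block,
          show pre ++ c :: d :: a :: b :: rest' = (pre ++ [c, d, a, b]) ++ rest' by simp,
          show pre.length + 4 = (pre ++ [c, d, a, b]).length by simp,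
          swapTwoLoopA_eq rest' (pre ++ [c, d, a, b])]
      simp [swapTwoSpec]
termination_by rest.length

lemma swapTwoBuildB_eq (rest pre : List Char) (hp : pre.length % 4 = 0) :
    swapTwoBuildB (pre ++ rest) ((pre ++ rest).length - (pre ++ rest).length % 4) pre.length
      ++ (pre ++ rest).drop ((pre ++ rest).length - (pre ++ rest).length % 4)
      = swapTwoSpec rest := by
  have hlen : (pre ++ rest).length = pre.length + rest.length := by simp
  match rest with
  | a :: b :: c :: d :: rest' =>
      have hrl : (a :: b :: c :: d :: rest').length = rest'.length + 4 := by simp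
      have hlt : pre.length <
          (pre ++ a :: b :: c :: d :: rest').length - (pre ++ a :: b :: c :: d :: rest').length % 4 := by
        omega
      rw [swapTwoBuildB, dif_pos hlt]
      have hdrop : (pre ++ a :: b :: c :: d :: rest').drop pre.length = a :: b :: c :: d :: rest' :=
        List.drop_left
      have hdrop2 : (pre ++ a :: b :: c :: d :: rest').drop (pre.length + 2) = c :: d :: rest' := by
        rw [show pre ++ a :: b :: c :: d :: rest' = (pre ++ [a, b]) ++ c :: d :: rest' by simp,
            show pre.length + 2 = (pre ++ [a, b]).length by simp]
        exact List.drop_left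
      rw [hdrop, hdrop2,
          show (c :: d :: rest').take 2 = [c, d] from rfl,
          show (a :: b :: c :: d :: rest').take 2 = [a, b] from rfl,
          show pre.length + 4 = (pre ++ [a, b, c, d]).length by simp,
          show pre ++ a :: b :: c :: d :: rest' = (pre ++ [a, b, c, d]) ++ rest' by simp,
          List.append_assoc,
          swapTwoBuildB_eq rest' (pre ++ [a, b, c, d]) (by simp [hp])]
      simp [swapTwoSpec]
  | ([] : List Char) =>
      have heq : (pre ++ ([] : List Char)).length - (pre ++ ([] : List Char)).length % 4 = pre.length := by
        simp only [List.length_append, List.length_cons, List.length_nil]; omega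
      rw [heq, swapTwoBuildB, dif_neg (lt_irrefl _), List.nil_append, List.drop_left]; rfl
  | [a] =>
      have heq : (pre ++ [a]).length - (pre ++ [a]).length % 4 = pre.length := by
        simp only [List.length_append, List.length_cons, List.length_nil]; omega
      rw [heq, swapTwoBuildB, dif_neg (lt_irrefl _), List.nil_append, List.drop_left]; rfl
  | [a, b] =>
      have heq : (pre ++ [a, b]).length - (pre ++ [a, b]).length % 4 = pre.length := by
        simp only [List.length_append, List.length_cons, List.length_nil]; omega
      rw [heq, swapTwoBuildB, dif_neg (lt_irrefl _), List.nil_append, List.drop_left]; rfl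
  | [a, b, c] =>
      have heq : (pre ++ [a, b, c]).length - (pre ++ [a, b, c]).length % 4 = pre.length := by
        simp only [List.length_append, List.length_cons, List.length_nil]; omega
      rw [heq, swapTwoBuildB, dif_neg (lt_irrefl _), List.nil_append, List.drop_left]; rfl
termination_by rest.length

-- ===== VERDICT (by name: the statement is the Claim_ definition above) =====
theorem swap_two_spec : Claim_equal_swap_two := by
  intro txt _
  unfold Spec_swap_two swap_two swap_two_alt
  have hA := swapTwoLoopA_eq txt.toList []
  have hB := swapTwoBuildB_eq txt.toList [] (by simp)
  simp only [List.nil_append, List.length_nil] at hA hB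
  rw [hA, hB]
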